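-- pv_equiv track=rewrite | github.com/richkule/Python-Project | biz.py | gor
-- ===== SOURCE A (Python) =====
-- def gor(a):
--     i = 0
--     for elem in a[-1:0:-1]:
--         if elem.isupper():
--             break
--         else:
--             i+=1
--     return [a[0:-i-1],a[-i-1:]]
-- ===== SOURCE B (Python) =====
-- def gor(a):
--     k = 0
--     for i, c in enumerate(a):
--         if i > 0 and c.isupper():
--             k = i
--     return [a[:k], a[k:]]
-- ===== Notes on version B (the rewrite author's own statement) =====
-- stated objective: simpler
-- what changed: B replaces A's backward scan over the reversed slice a[-1:0:-1] (counting non-uppercase chars until a break, then slicing with negative indices) by a single forward enumerate pass that tracks the last uppercase index k >= 1 and slices with non-negative indices.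
import Mathlib
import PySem

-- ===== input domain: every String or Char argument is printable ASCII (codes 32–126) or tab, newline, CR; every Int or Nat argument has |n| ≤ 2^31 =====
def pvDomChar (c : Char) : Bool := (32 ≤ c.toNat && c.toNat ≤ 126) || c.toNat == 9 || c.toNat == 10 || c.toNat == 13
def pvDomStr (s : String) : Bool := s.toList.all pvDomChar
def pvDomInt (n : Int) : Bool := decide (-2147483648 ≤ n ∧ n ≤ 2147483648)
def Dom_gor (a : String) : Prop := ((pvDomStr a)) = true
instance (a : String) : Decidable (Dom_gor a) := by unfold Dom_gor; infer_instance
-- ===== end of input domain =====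

-- B tracks the last uppercase index in one forward enumerate pass instead of A's backward
-- count over the reversed slice; same return value everywhere (objective: simpler).

-- ===== PORT A =====
-- the 'for elem in …: if elem.isupper(): break else: i += 1' loop, with accumulator i
def gorLoop : List Char → Nat → Nat
  | [], i => i
  | c :: cs, i => if PySem.Chars.isupper c then i else gorLoop cs (i + 1)

def gor (a : String) : List String :=
  let rev := (PySem.Str.slice? a (some (-1)) (some 0) (-1)).getD ""   -- a[-1:0:-1]
  let i := gorLoop rev.toList 0
  [PySem.Str.slice a (some 0) (some (-(i : Int) - 1)),                 -- a[0:-i-1]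
   PySem.Str.slice a (some (-(i : Int) - 1)) none]                     -- a[-i-1:]

-- ===== PORT B =====
def gor_alt (a : String) : List String :=
  let k : Int := (PySem.List.enumerate a.toList).foldl
    (fun k p => if decide (0 < p.1) && PySem.Chars.isupper p.2 then p.1 else k) 0
  [PySem.Str.slice a none (some k),                                    -- a[:k]
   PySem.Str.slice a (some k) none]                                    -- a[k:]

-- ===== PRECONDITION & SPEC =====
def Spec_gor (a : String) (out : List String) : Prop := out = gor_alt a
instance (a : String) (out : List String) : Decidable (Spec_gor a out) := by unfold Spec_gor; infer_instance

-- ===== CLAIM (what is proved, stated in full; the proofs are below) =====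
def Claim_equal_gor : Prop := ∀ (a : String), Dom_gor a → Spec_gor a (gor a)

-- ===== LEMMAS AND PROOFS =====

-- a[-1:0:-1] is the reversed tail
theorem pv_slice_rev_tail {α : Type} (xs : List α) :
    PySem.List.slice? xs (some (-1)) (some 0) (-1) = some xs.tail.reverse := by
  cases xs with
  | nil => rfl
  | cons x t =>
    simp only [PySem.List.slice?, PySem.List.sliceIndices]
    norm_num
    have hif : (if 0 < t.length then t.length else 0) = t.length := by split <;> omega
    rw [hif]
    apply List.ext_getElem
    · simp
    · intro i h1 h2
      simp only [List.getElem_map, List.getElem_range, List.getElem_reverse]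
      simp only [List.length_map, List.length_range] at h1
      have hnat : ((t.length : Int) + -(i : Int)).toNat = (t.length - 1 - i) + 1 := by omega
      simp only [hnat, List.getElem_cons_succ]

-- A's counter is the length of the non-uppercase prefix of what it scans
theorem pv_gorLoop_eq (l : List Char) (i : Nat) :
    gorLoop l i = i + (l.takeWhile (fun c => !PySem.Chars.isupper c)).length := by
  induction l generalizing i with
  | nil => simp [gorLoop]
  | cons c cs ih =>
    simp only [gorLoop, List.takeWhile]
    cases h : PySem.Chars.isupper c
    · simp [ih]; omega
    · simp

-- the split boundary, seen from the tail of the string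
def pvK (t : List Char) : Nat :=
  t.length - (t.reverse.takeWhile (fun c => !PySem.Chars.isupper c)).length

theorem pv_takeWhile_le (t : List Char) :
    (t.takeWhile (fun c => !PySem.Chars.isupper c)).length ≤ t.length :=
  (List.takeWhile_sublist _).length_le

theorem pv_K_append (t : List Char) (c : Char) :
    pvK (t ++ [c]) = if PySem.Chars.isupper c then t.length + 1 else pvK t := by
  have hle := pv_takeWhile_le t.reverse
  rw [List.length_reverse] at hle
  cases h : PySem.Chars.isupper c
  · simp [pvK, h]
  · simp [pvK, h]

-- B's fold computes the boundary pvK of the tail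
theorem pv_foldB_eq (l : List Char) :
    (PySem.List.enumerate l).foldl
      (fun k p => if decide (0 < p.1) && PySem.Chars.isupper p.2 then p.1 else k) 0
      = (pvK l.tail : Int) := by
  induction l using List.reverseRecOn with
  | nil => rfl
  | append_singleton t c ih =>
    cases t with
    | nil =>
      simp [PySem.List.enumerate_cons, PySem.List.enumerate_nil, pvK]
    | cons x s =>
      rw [PySem.List.enumerate_append, List.foldl_append, ih]
      simp only [PySem.List.enumerate_cons, PySem.List.enumerate_nil, List.foldl_cons,
        List.foldl_nil, List.cons_append, List.tail_cons, List.length_cons]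
      rw [pv_K_append]
      cases h : PySem.Chars.isupper c
      · simp
      · simp

-- ===== VERDICT (by name: the statement is the Claim_ definition above) =====
theorem gor_spec : Claim_equal_gor := by
  intro a _
  unfold Spec_gor
  simp only [gor, gor_alt]
  rw [pv_foldB_eq]
  have hrev : (PySem.Str.slice? a (some (-1)) (some 0) (-1)).getD "" =
      String.ofList a.toList.tail.reverse := by
    simp [PySem.Str.slice?, PySem.Chars.slice?_eq_listSlice?, pv_slice_rev_tail]
  rw [hrev]
  set t := a.toList.tail with ht
  have htoList : (String.ofList t.reverse).toList = t.reverse := by simp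
  rw [htoList, pv_gorLoop_eq]
  set cnt := (t.reverse.takeWhile (fun c => !PySem.Chars.isupper c)).length with hcnt
  have hle : cnt ≤ t.length := by
    have := pv_takeWhile_le t.reverse
    rwa [List.length_reverse] at this
  have htlen : t.length = a.toList.length - 1 := by
    rw [ht, List.length_tail]
  have hKle : pvK t ≤ t.length := by unfold pvK; omega
  have hneg : (-(((0 : Nat) + cnt : Nat) : Int) - 1) = -(((0 + cnt + 1 : Nat) : Int)) := by
    push_cast; ring
  apply List.ext_getElem
  · simp
  · intro i h1 h2
    have hi : i = 0 ∨ i = 1 := by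
      simp at h1; omega
    have key : a.toList.length - (0 + cnt + 1) = pvK t := by
      unfold pvK; omega
    rcases hi with rfl | rfl
    · show PySem.Str.slice a (some 0) (some (-(((0:Nat) + cnt : Nat) : Int) - 1)) =
        PySem.Str.slice a none (some ((pvK t : Nat) : Int))
      apply String.toList_inj.mp
      rw [PySem.Str.toList_slice, PySem.Str.toList_slice]
      simp only [PySem.Chars.slice_eq_listSlice]
      rw [hneg, PySem.List.slice_zero_start,
        PySem.List.slice_to_neg_natCast _ _ (by omega : 0 < 0 + cnt + 1),
        PySem.List.slice_to_natCast, key]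
    · show PySem.Str.slice a (some (-(((0:Nat) + cnt : Nat) : Int) - 1)) none =
        PySem.Str.slice a (some ((pvK t : Nat) : Int)) none
      apply String.toList_inj.mp
      rw [PySem.Str.toList_slice, PySem.Str.toList_slice]
      simp only [PySem.Chars.slice_eq_listSlice]
      rw [hneg, PySem.List.slice_from_neg_natCast _ _ (by omega : 0 < 0 + cnt + 1),
        PySem.List.slice_from_natCast, key]
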